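-- pv_equiv track=rewrite | github.com/THRALLab/pedal-kennel | examples/chosen_problems_st3-3_as3-3_at1_v1/bakery_for_composition_code_highest_filter/submissions/Girafarig_28396215.py | high_score
-- ===== SOURCE A (Python) =====
-- def high_score(scores: list[int]) -> int:
--     if not scores:
--         return None
--     highest_score = scores[0]
--     taking = True
--     for score in scores:
--         if -999 == score:
--             taking = False
--         elif taking and score >= 100 and score > highest_score:
--             highest_score = score
--     if highest_score < 100:
--         return None
--     return highest_score
-- ===== SOURCE B (Python) =====
-- def high_score(scores: list[int]) -> int:
--     try:
--         cut = scores.index(-999)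
--     except ValueError:
--         cut = len(scores)
--     eligible = [s for s in scores[:cut] if s >= 100]
--     return max(eligible) if eligible else None
-- ===== Notes on version B (the rewrite author's own statement) =====
-- stated objective: simpler
-- what changed: Replaces the running-max-with-flag single pass over the whole list by an index-then-aggregate decomposition: locate the -999 sentinel with list.index, slice the prefix, filter the scores >= 100 and return builtin max (or None when the filtered list is empty, which also covers the empty input).
import Mathlib
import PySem

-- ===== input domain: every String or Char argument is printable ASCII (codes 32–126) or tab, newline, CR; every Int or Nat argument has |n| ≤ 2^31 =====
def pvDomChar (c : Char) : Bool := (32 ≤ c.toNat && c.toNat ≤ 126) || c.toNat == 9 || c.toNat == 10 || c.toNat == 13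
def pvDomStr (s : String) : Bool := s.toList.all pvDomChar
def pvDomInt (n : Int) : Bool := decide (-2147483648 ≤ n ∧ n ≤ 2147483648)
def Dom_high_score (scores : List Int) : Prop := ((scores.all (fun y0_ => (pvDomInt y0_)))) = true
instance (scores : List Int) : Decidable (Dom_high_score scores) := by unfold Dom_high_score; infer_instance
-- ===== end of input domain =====

-- B replaces A's running-max-with-flag pass by an index/slice/filter/max decomposition (simpler; return value only).

-- ===== PORT A =====
-- loop body of A: state (highest_score, taking)
def pvStepA (st : Int × Bool) (score : Int) : Int × Bool :=
  if score = -999 then (st.1, false)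
  else if st.2 && decide (100 ≤ score) && decide (st.1 < score) then (score, st.2)
  else st

def high_score (scores : List Int) : Option Int :=
  match scores with
  | [] => none
  | s0 :: _ =>
    let st := scores.foldl pvStepA (s0, true)
    if st.1 < 100 then none else some st.1

-- ===== PORT B =====
def high_score_alt (scores : List Int) : Option Int :=
  let cut : Nat := match PySem.List.index? scores (-999) with
    | some i => i
    | none => scores.length
  let eligible := (PySem.List.slice scores none (some (Int.ofNat cut))).filter (fun s => decide (100 ≤ s))
  if eligible.isEmpty then none else PySem.List.max? eligible (fun y => y)

-- ===== PRECONDITION & SPEC =====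
def Spec_high_score (scores : List Int) (out : Option Int) : Prop := out = high_score_alt scores
instance (scores : List Int) (out : Option Int) : Decidable (Spec_high_score scores out) := by unfold Spec_high_score; infer_instance

-- ===== CLAIM (what is proved, stated in full; the proofs are below) =====
def Claim_equal_high_score : Prop := ∀ (scores : List Int), Dom_high_score scores → Spec_high_score scores (high_score scores)

-- ===== LEMMAS AND PROOFS =====

-- once taking = false, A's loop never changes the state
theorem pvFoldA_false (l : List Int) (h : Int) :
    l.foldl pvStepA (h, false) = (h, false) := by
  induction l with
  | nil => rfl
  | cons s t ih =>
    simp only [List.foldl_cons, pvStepA]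
    split_ifs <;> simp_all

-- on a sentinel-free prefix, A's loop is a running max over the scores ≥ 100
theorem pvFoldA_clean (l : List Int) (h : Int) (hl : ∀ s ∈ l, s ≠ -999) :
    l.foldl pvStepA (h, true) = ((l.filter (fun s => decide (100 ≤ s))).foldl max h, true) := by
  induction l generalizing h with
  | nil => rfl
  | cons s t ih =>
    have hs : s ≠ -999 := hl s (by simp)
    have ht : ∀ x ∈ t, x ≠ -999 := fun x hx => hl x (by simp [hx])
    simp only [List.foldl_cons, pvStepA, if_neg hs, List.filter_cons]
    by_cases h100 : 100 ≤ s
    · by_cases hlt : h < s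
      · simp [h100, hlt, ih _ ht, max_eq_right (le_of_lt hlt)]
      · simp [h100, hlt, ih _ ht, max_eq_left (not_lt.mp hlt)]
    · simp [h100, ih _ ht]

-- B's cut-then-slice prefix is the sentinel-free prefix
theorem pvSlice_cut (scores : List Int) :
    PySem.List.slice scores none
      (some (Int.ofNat ((match PySem.List.index? scores (-999) with
               | some i => i
               | none => scores.length) : Nat)))
    = scores.takeWhile (fun s => decide (s ≠ -999)) := by
  rw [PySem.List.slice_to]
  case hb => exact Int.natCast_nonneg _
  simp only [Int.ofNat_eq_natCast, Int.toNat_natCast]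
  induction scores with
  | nil => rfl
  | cons s t ih =>
    by_cases hs : s = -999
    · subst hs
      rw [PySem.List.index?_cons_self]
      simp
    · cases hidx : PySem.List.index? t (-999) with
      | none =>
        rw [hidx] at ih
        simp at ih
        rw [PySem.List.index?_cons_of_ne t hs, hidx]
        simp [hs]
        exact ih
      | some i =>
        rw [hidx] at ih
        simp at ih
        rw [PySem.List.index?_cons_of_ne t hs, hidx]
        simp [hs]
        exact ih

theorem pvMem_le_foldl_max (l : List Int) (a x : Int) (hx : x ∈ l) :
    x ≤ l.foldl max a := by
  induction l generalizing a with
  | nil => simp at hx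
  | cons s t ih =>
    rcases List.mem_cons.mp hx with rfl | hx'
    · calc x ≤ max a x := le_max_right _ _
        _ ≤ t.foldl max (max a x) := (PySem.List.le_foldl_max _ _).1
    · exact ih _ hx'

-- ===== VERDICT (by name: the statement is the Claim_ definition above) =====
theorem high_score_spec : Claim_equal_high_score := by
  intro scores _
  unfold Spec_high_score high_score high_score_alt
  simp only [pvSlice_cut]
  cases scores with
  | nil => rfl
  | cons s0 t =>
    show (if (List.foldl pvStepA (s0, true) (s0 :: t)).1 < 100 then none
          else some (List.foldl pvStepA (s0, true) (s0 :: t)).1)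
       = (if ((List.takeWhile (fun s => decide (s ≠ -999)) (s0 :: t)).filter
                (fun s => decide (100 ≤ s))).isEmpty = true then none
          else PySem.List.max? ((List.takeWhile (fun s => decide (s ≠ -999)) (s0 :: t)).filter
                (fun s => decide (100 ≤ s))) (fun y => y))
    set q : Int → Bool := fun s => decide (s ≠ -999) with hq
    set p := (s0 :: t).takeWhile q with hp
    have hpd : s0 :: t = p ++ (s0 :: t).dropWhile q := (List.takeWhile_append_dropWhile).symm
    have hclean : ∀ s ∈ p, s ≠ -999 := by
      intro s hs
      have := List.mem_takeWhile_imp (p := q) (by simpa [← hp] using hs)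
      simpa [hq] using this
    have hfold : (List.foldl pvStepA (s0, true) (s0 :: t)).1
        = (p.filter (fun s => decide (100 ≤ s))).foldl max s0 := by
      conv_lhs => rw [hpd]
      rw [List.foldl_append, pvFoldA_clean p s0 hclean]
      cases hd : (s0 :: t).dropWhile q with
      | nil => simp
      | cons x r =>
        have hx0 := List.head_dropWhile_not (l := s0 :: t) q (by simp [hd])
        simp only [hd, List.head_cons] at hx0
        have hx' : x = -999 := by simpa [hq] using hx0
        simp [List.foldl_cons, pvStepA, hx', pvFoldA_false]
    have hmem : 100 ≤ s0 → s0 ∈ p.filter (fun s => decide (100 ≤ s)) := by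
      intro h100
      have hqs0 : q s0 = true := by simp [hq]; omega
      have : s0 ∈ p := by rw [hp, List.takeWhile_cons, hqs0]; simp
      simpa using ⟨this, h100⟩
    rw [hfold]
    cases he : p.filter (fun s => decide (100 ≤ s)) with
    | nil =>
      have : s0 < 100 := by
        by_contra hc
        have := hmem (by omega)
        simp [he] at this
      simp [this]
    | cons e0 r =>
      have he0 : 100 ≤ e0 := by
        have : e0 ∈ p.filter (fun s => decide (100 ≤ s)) := by simp [he]
        simpa using (List.of_mem_filter this)
      have hr : max s0 e0 = e0 ∨ s0 ∈ r := by
        by_cases h100 : 100 ≤ s0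
        · have := hmem h100
          rw [he] at this
          rcases List.mem_cons.mp this with rfl | hs
          · exact Or.inl (max_self _)
          · exact Or.inr hs
        · exact Or.inl (max_eq_right (by omega))
      have hmax : List.foldl max (max s0 e0) r = List.foldl max e0 r := by
        rcases hr with h | h
        · rw [h]
        · have h1 : s0 ≤ List.foldl max e0 r := pvMem_le_foldl_max r e0 s0 h
          rw [List.foldl_assoc]
          exact max_eq_right h1
      have hge : 100 ≤ List.foldl max e0 r :=
        le_trans he0 (PySem.List.le_foldl_max _ _).1
      simp only [List.foldl_cons, hmax]
      rw [PySem.List.max?_id_cons]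
      simp
      omega
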